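-- pv_equiv track=rewrite | github.com/danielavellar15/trab-grafos-2019.1 | main.py | sentence_similarity
-- ===== SOURCE A (Python) =====
-- def getWeight(index, itens_types):
--     if index < itens_types[0]:
--         return 2
--     elif index < itens_types[1]:
--         return 2
--     elif index < itens_types[2]:
--         return 1
--     elif index < itens_types[3]:
--         return 1
--
-- def sentence_similarity(similarity_matrix, sent, index, all_words, itens_types):
--
--
--     # build the vector for the first sentence
--     for i in range(len(sent)):
--         for aux in range(len(sent)):
--             if i == aux:
--                 continue
--             x = all_words.index(sent[i])
--             y = all_words.index(sent[aux])
--             if index < itens_types[3] - 1: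
--                 similarity_matrix[x][y] += getWeight(index, itens_types)
--             else:
--                 similarity_matrix[x][y] = similarity_matrix[x][y] * 2
--
--
--     return similarity_matrix
-- ===== SOURCE B (Python) =====
-- def sentence_similarity(similarity_matrix, sent, index, all_words, itens_types):
--     # Aggregated rewrite: one pass builds word->first-index and per-index counts,
--     # then each affected cell is updated ONCE with the combined contribution of
--     # all position pairs (add weight*pairs, or multiply by 2**pairs).
--     if len(sent) < 2:
--         return similarity_matrix
--     pos = {}
--     for i, w in enumerate(all_words):
--         if w not in pos:
--             pos[w] = i
--     cnt = {}
--     for w in sent: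
--         x = pos[w]
--         cnt[x] = cnt.get(x, 0) + 1
--     if index < itens_types[3] - 1:
--         wgt = 2 if (index < itens_types[0] or index < itens_types[1]) else 1
--         for x in cnt:
--             for y in cnt:
--                 p = cnt[x] * cnt[y] - (cnt[x] if x == y else 0)
--                 if p != 0:
--                     similarity_matrix[x][y] += wgt * p
--     else:
--         for x in cnt:
--             for y in cnt:
--                 p = cnt[x] * cnt[y] - (cnt[x] if x == y else 0)
--                 if p != 0:
--                     similarity_matrix[x][y] *= 2 ** p
--     return similarity_matrix
-- ===== Notes on version B (the rewrite author's own statement) =====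
-- stated objective: faster
-- what changed: Instead of scanning all O(n^2) position pairs and calling all_words.index twice per pair, B builds a word->first-index dict and per-index counts in one pass and updates each affected matrix cell once with the aggregated contribution (add weight*pairs, or multiply by 2^pairs).
import Mathlib
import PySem

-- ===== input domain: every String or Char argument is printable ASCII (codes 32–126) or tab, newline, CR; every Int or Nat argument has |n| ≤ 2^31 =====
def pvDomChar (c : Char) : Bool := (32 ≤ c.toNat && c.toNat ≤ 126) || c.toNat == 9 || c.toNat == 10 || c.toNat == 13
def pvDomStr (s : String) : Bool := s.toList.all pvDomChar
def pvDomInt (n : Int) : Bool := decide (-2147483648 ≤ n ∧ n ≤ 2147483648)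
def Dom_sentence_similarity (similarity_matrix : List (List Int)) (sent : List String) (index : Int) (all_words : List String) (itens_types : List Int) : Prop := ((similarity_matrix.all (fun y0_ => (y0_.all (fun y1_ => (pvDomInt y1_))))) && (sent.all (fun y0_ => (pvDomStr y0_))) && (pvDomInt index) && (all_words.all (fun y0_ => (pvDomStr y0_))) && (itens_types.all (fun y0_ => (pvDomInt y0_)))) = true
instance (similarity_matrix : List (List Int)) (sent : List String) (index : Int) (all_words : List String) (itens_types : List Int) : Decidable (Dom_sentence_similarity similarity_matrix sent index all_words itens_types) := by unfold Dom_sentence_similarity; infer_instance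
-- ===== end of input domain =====

-- B replaces A's loop over all position pairs (computing all_words.index for each) by a word→index
-- dict built once plus per-index counts, updating each affected cell once with the aggregated
-- contribution (add weight·pairs / multiply by 2^pairs); both mutate in place in Python, and the
-- equivalence proved here is about the return value.

-- ===== PORT A =====
-- m[x][y] read and write (shared matrix primitives; both Pythons do `similarity_matrix[x][y] ...`)
def pvMGet (m : List (List Int)) (x y : Int) : Int :=
  PySem.List.pyGetD (PySem.List.pyGetD m x []) y 0

def pvMSet (m : List (List Int)) (x y : Int) (v : Int) : List (List Int) :=
  PySem.List.pySetD m x (PySem.List.pySetD (PySem.List.pyGetD m x []) y v)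

-- all_words.index(w) (total form; Pre_ guarantees membership)
def pvIdx (aw : List String) (w : String) : Int :=
  (((PySem.List.index? aw w).getD 0 : Nat) : Int)

-- port of getWeight (falls through to None when no branch fires)
def pvGetWeight (index : Int) (itens_types : List Int) : Option Int :=
  if index < PySem.List.pyGetD itens_types 0 0 then some 2
  else if index < PySem.List.pyGetD itens_types 1 0 then some 2
  else if index < PySem.List.pyGetD itens_types 2 0 then some 1
  else if index < PySem.List.pyGetD itens_types 3 0 then some 1
  else none

def sentence_similarity (similarity_matrix : List (List Int)) (sent : List String) (index : Int) (all_words : List String) (itens_types : List Int) : List (List Int) :=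
  (PySem.List.pyRange 0 (sent.length : Int) 1).foldl (fun m i =>
    (PySem.List.pyRange 0 (sent.length : Int) 1).foldl (fun m aux =>
      if i = aux then m
      else
        let x := pvIdx all_words (PySem.List.pyGetD sent i "")
        let y := pvIdx all_words (PySem.List.pyGetD sent aux "")
        if index < PySem.List.pyGetD itens_types 3 0 - 1 then
          pvMSet m x y (pvMGet m x y + (pvGetWeight index itens_types).getD 0)
        else
          pvMSet m x y (pvMGet m x y * 2)) m) similarity_matrix

-- ===== PORT B =====
def sentence_similarity_alt (similarity_matrix : List (List Int)) (sent : List String) (index : Int) (all_words : List String) (itens_types : List Int) : List (List Int) :=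
  if sent.length < 2 then similarity_matrix
  else
    let pos : PySem.Dict String Int :=
      (PySem.List.enumerate all_words 0).foldl
        (fun d p => if !(d.contains p.2) then d.insert p.2 p.1 else d) PySem.Dict.empty
    let cnt : PySem.Dict Int Int :=
      sent.foldl (fun d w => d.insert (pos.getD w 0) (d.getD (pos.getD w 0) 0 + 1)) PySem.Dict.empty
    let pairs : Int → Int → Int := fun x y =>
      cnt.getD x 0 * cnt.getD y 0 - (if x = y then cnt.getD x 0 else 0)
    if index < PySem.List.pyGetD itens_types 3 0 - 1 then
      let wgt : Int :=
        if index < PySem.List.pyGetD itens_types 0 0 ∨ index < PySem.List.pyGetD itens_types 1 0 then 2 else 1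
      cnt.keys.foldl (fun m x => cnt.keys.foldl (fun m y =>
        let p := pairs x y
        if p ≠ 0 then pvMSet m x y (pvMGet m x y + wgt * p) else m) m) similarity_matrix
    else
      cnt.keys.foldl (fun m x => cnt.keys.foldl (fun m y =>
        let p := pairs x y
        if p ≠ 0 then pvMSet m x y (pvMGet m x y * 2 ^ p.toNat) else m) m) similarity_matrix

-- ===== PRECONDITION & SPEC =====
-- Pre_ excludes exactly the inputs on which A raises: with ≥ 2 words it needs every sentence word
-- present in all_words (else ValueError), itens_types[3] (else IndexError), and the matrix cell
-- [index of u][index of v] for every pair of words that actually occurs at two distinct positions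
-- (else IndexError).
def Pre_sentence_similarity (similarity_matrix : List (List Int)) (sent : List String) (index : Int) (all_words : List String) (itens_types : List Int) : Prop :=
  2 ≤ sent.length →
    (4 ≤ itens_types.length ∧
     (∀ u ∈ sent, u ∈ all_words) ∧
     (∀ u ∈ sent, ∀ v ∈ sent, (u ≠ v ∨ 2 ≤ sent.count u) →
        ((PySem.List.index? all_words u).getD 0 < similarity_matrix.length ∧
         (PySem.List.index? all_words v).getD 0 <
           (similarity_matrix.getD ((PySem.List.index? all_words u).getD 0) []).length)))

instance (similarity_matrix : List (List Int)) (sent : List String) (index : Int) (all_words : List String) (itens_types : List Int) : Decidable (Pre_sentence_similarity similarity_matrix sent index all_words itens_types) := by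
  unfold Pre_sentence_similarity; infer_instance

def pvWitness_sentence_similarity : List (List Int) × List String × Int × List String × List Int :=
  ([[0, 1], [2, 3]], ["a", "b"], 0, ["a", "b"], [1, 2, 3, 4])

def Spec_sentence_similarity (similarity_matrix : List (List Int)) (sent : List String) (index : Int) (all_words : List String) (itens_types : List Int) (out : List (List Int)) : Prop := out = sentence_similarity_alt similarity_matrix sent index all_words itens_types
instance (similarity_matrix : List (List Int)) (sent : List String) (index : Int) (all_words : List String) (itens_types : List Int) (out : List (List Int)) : Decidable (Spec_sentence_similarity similarity_matrix sent index all_words itens_types out) := by unfold Spec_sentence_similarity; infer_instance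

-- ===== CLAIM (what is proved, stated in full; the proofs are below) =====
def Claim_equal_sentence_similarity : Prop := ∀ (similarity_matrix : List (List Int)) (sent : List String) (index : Int) (all_words : List String) (itens_types : List Int), Dom_sentence_similarity similarity_matrix sent index all_words itens_types → Pre_sentence_similarity similarity_matrix sent index all_words itens_types → Spec_sentence_similarity similarity_matrix sent index all_words itens_types (sentence_similarity similarity_matrix sent index all_words itens_types)

-- ===== LEMMAS AND PROOFS =====
def pvRow (m : List (List Int)) (x : Nat) : List Int := m[x]?.getD []
def pvEnt (m : List (List Int)) (x y : Nat) : Int := (pvRow m x)[y]?.getD 0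

theorem pvMGet_nonneg (m : List (List Int)) {x y : Int} (hx : 0 ≤ x) (hy : 0 ≤ y) :
    pvMGet m x y = pvEnt m x.toNat y.toNat := by
  simp [pvMGet, pvEnt, pvRow, PySem.List.pyGetD_of_nonneg _ _ hx,
    PySem.List.pyGetD_of_nonneg _ _ hy, List.getD_eq_getElem?_getD]

theorem pvMSet_nonneg (m : List (List Int)) {x y : Int} (v : Int) (hx : 0 ≤ x) (hy : 0 ≤ y) :
    pvMSet m x y v = m.set x.toNat ((pvRow m x.toNat).set y.toNat v) := by
  simp [pvMSet, pvRow, PySem.List.pySetD_of_nonneg _ _ hx, PySem.List.pySetD_of_nonneg _ _ hy,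
    PySem.List.pyGetD_of_nonneg _ _ hx, List.getD_eq_getElem?_getD]

theorem pvMSet_length (m : List (List Int)) (x y v : Int) :
    (pvMSet m x y v).length = m.length := by
  simp [pvMSet, PySem.List.length_pySetD]

theorem pvRow_set_self (m : List (List Int)) (x : Nat) (r : List Int) (hx : x < m.length) :
    pvRow (m.set x r) x = r := by
  unfold pvRow; rw [List.getElem?_set]; simp [hx]

theorem pvRow_set_out (m : List (List Int)) (x : Nat) (r : List Int) (hx : ¬ x < m.length) :
    pvRow (m.set x r) x = pvRow m x := by
  unfold pvRow; rw [List.getElem?_set]; simp [hx]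

theorem pvRow_set_ne (m : List (List Int)) (x : Nat) (r : List Int) (i : Nat) (h : ¬ x = i) :
    pvRow (m.set x r) i = pvRow m i := by
  unfold pvRow; rw [List.getElem?_set, if_neg h]

theorem pvMSet_rowlen (m : List (List Int)) {x y : Int} (v : Int) (hx : 0 ≤ x) (hy : 0 ≤ y) (j : Nat) :
    (pvRow (pvMSet m x y v) j).length = (pvRow m j).length := by
  rw [pvMSet_nonneg m v hx hy]
  by_cases hxj : x.toNat = j
  · subst hxj
    by_cases hxm : x.toNat < m.length
    · rw [pvRow_set_self m _ _ hxm, List.length_set]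
    · rw [pvRow_set_out m _ _ hxm]
  · rw [pvRow_set_ne m _ _ j hxj]

theorem pvEnt_set (m : List (List Int)) (x y : Nat) (v : Int) (i j : Nat) :
    pvEnt (m.set x ((pvRow m x).set y v)) i j =
      if i = x ∧ j = y ∧ x < m.length ∧ y < (pvRow m x).length then v else pvEnt m i j := by
  by_cases hxi : i = x
  · subst hxi
    by_cases hxm : i < m.length
    · rw [pvEnt, pvRow_set_self m i _ hxm]
      by_cases hyj : j = y
      · subst hyj
        by_cases hyr : j < (pvRow m i).length
        · rw [List.getElem?_set, if_pos rfl, if_pos hyr]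
          simp [hxm, hyr]
        · rw [List.getElem?_set, if_pos rfl, if_neg hyr]
          rw [if_neg (by tauto)]
          rw [pvEnt, List.getElem?_eq_none_iff.mpr (by omega)]
      · rw [List.getElem?_set, if_neg (fun h => hyj h.symm), if_neg (by tauto)]
        rfl
    · rw [pvEnt, pvRow_set_out m i _ hxm, if_neg (by tauto)]
      rfl
  · rw [pvEnt, pvRow_set_ne m x _ i (fun h => hxi h.symm), if_neg (by tauto)]
    rfl

def pvStepF (f : Int → Int) (m : List (List Int)) (q : Int × Int) : List (List Int) :=
  pvMSet m q.1 q.2 (f (pvMGet m q.1 q.2))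

def pvCellOK (m : List (List Int)) (q : Int × Int) : Prop :=
  0 ≤ q.1 ∧ 0 ≤ q.2 ∧ q.1.toNat < m.length ∧ q.2.toNat < (pvRow m q.1.toNat).length

theorem pvFoldl_shape {α : Type} (step : List (List Int) → α → List (List Int))
    (l : List α) (m : List (List Int))
    (h : ∀ m' q, q ∈ l → ((step m' q).length = m'.length ∧
          ∀ j : Nat, (pvRow (step m' q) j).length = (pvRow m' j).length)) :
    (l.foldl step m).length = m.length ∧
      ∀ j : Nat, (pvRow (l.foldl step m) j).length = (pvRow m j).length := by
  induction l generalizing m with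
  | nil => simp
  | cons q t ih =>
    rw [List.foldl_cons]
    have hq := h m q (by simp)
    have ht := ih (step m q) (fun m' q' hq' => h m' q' (by simp [hq']))
    exact ⟨ht.1.trans hq.1, fun j => (ht.2 j).trans (hq.2 j)⟩

theorem pvCellOK_of_shape (m m' : List (List Int)) (q : Int × Int)
    (hl : m'.length = m.length) (hr : ∀ j : Nat, (pvRow m' j).length = (pvRow m j).length)
    (h : pvCellOK m q) : pvCellOK m' q := by
  obtain ⟨h1, h2, h3, h4⟩ := h
  exact ⟨h1, h2, by omega, by rw [hr]; omega⟩

theorem pvEntA (f : Int → Int) (ps : List (Int × Int)) (m : List (List Int))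
    (h : ∀ q ∈ ps, pvCellOK m q) (x y : Nat)
    (hx : x < m.length) (hy : y < (pvRow m x).length) :
    pvEnt (ps.foldl (pvStepF f) m) x y = f^[ps.count ((x : Int), (y : Int))] (pvEnt m x y) := by
  induction ps generalizing m with
  | nil => simp
  | cons q t ih =>
    obtain ⟨hq1, hq2, hq3, hq4⟩ := h q (by simp)
    have hstep : pvStepF f m q = m.set q.1.toNat ((pvRow m q.1.toNat).set q.2.toNat
        (f (pvEnt m q.1.toNat q.2.toNat))) := by
      rw [pvStepF, pvMGet_nonneg m hq1 hq2, pvMSet_nonneg m _ hq1 hq2]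
    have hsh1 : (pvStepF f m q).length = m.length := by rw [pvStepF, pvMSet_length]
    have hsh2 : ∀ j : Nat, (pvRow (pvStepF f m q) j).length = (pvRow m j).length := by
      intro j; rw [pvStepF, pvMSet_rowlen m _ hq1 hq2]
    rw [List.foldl_cons,
      ih (pvStepF f m q)
        (fun q' hq' => pvCellOK_of_shape m _ q' hsh1 hsh2 (h q' (by simp [hq'])))
        (by omega) (by rw [hsh2]; omega)]
    rw [hstep, pvEnt_set]
    rw [List.count_cons]
    by_cases hcell : q = ((x : Int), (y : Int))
    · subst hcell
      simp only [Int.toNat_natCast] at hq3 hq4 ⊢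
      rw [if_pos ⟨trivial, trivial, hq3, hq4⟩]
      simp only [BEq.rfl, if_true]
      rw [← Function.iterate_succ_apply]
    · have e1 : ¬ (x = q.1.toNat ∧ y = q.2.toNat ∧ q.1.toNat < m.length ∧
          q.2.toNat < (pvRow m q.1.toNat).length) := by
        rintro ⟨h1, h2, -, -⟩
        exact hcell (Prod.ext (by omega) (by omega))
      rw [if_neg e1, if_neg (by simp only [beq_iff_eq]; exact hcell), Nat.add_zero]

theorem pvEntB (c : Int × Int → Prop) [DecidablePred c] (g : Int × Int → Int → Int)
    (ps : List (Int × Int)) (hnd : ps.Nodup) (m : List (List Int))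
    (h : ∀ q ∈ ps, c q → pvCellOK m q) (x y : Nat)
    (hx : x < m.length) (hy : y < (pvRow m x).length) :
    pvEnt (ps.foldl (fun m' q => if c q then pvMSet m' q.1 q.2 (g q (pvMGet m' q.1 q.2)) else m') m) x y
      = if (((x : Int), (y : Int)) ∈ ps ∧ c ((x : Int), (y : Int))) then
          g ((x : Int), (y : Int)) (pvEnt m x y) else pvEnt m x y := by
  induction ps generalizing m with
  | nil => simp
  | cons q t ih =>
    rw [List.nodup_cons] at hnd
    rw [List.foldl_cons]
    by_cases hc : c q
    · obtain ⟨hq1, hq2, hq3, hq4⟩ := h q (by simp) hc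
      have hstep : (if c q then pvMSet m q.1 q.2 (g q (pvMGet m q.1 q.2)) else m)
          = m.set q.1.toNat ((pvRow m q.1.toNat).set q.2.toNat
              (g q (pvEnt m q.1.toNat q.2.toNat))) := by
        rw [if_pos hc, pvMGet_nonneg m hq1 hq2, pvMSet_nonneg m _ hq1 hq2]
      have hsh1 : (m.set q.1.toNat ((pvRow m q.1.toNat).set q.2.toNat
          (g q (pvEnt m q.1.toNat q.2.toNat)))).length = m.length := by
        rw [List.length_set]
      have hsh2 : ∀ j : Nat, (pvRow (m.set q.1.toNat ((pvRow m q.1.toNat).set q.2.toNat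
          (g q (pvEnt m q.1.toNat q.2.toNat)))) j).length = (pvRow m j).length := by
        intro j
        by_cases hxj : q.1.toNat = j
        · subst hxj
          rw [pvRow_set_self m _ _ hq3, List.length_set]
        · rw [pvRow_set_ne m _ _ j hxj]
      rw [hstep]
      rw [ih hnd.2 _ (fun q' hq' hc' => pvCellOK_of_shape m _ q' hsh1 hsh2 (h q' (by simp [hq']) hc'))
        (by omega) (by rw [hsh2]; omega)]
      by_cases hcell : q = ((x : Int), (y : Int))
      · subst hcell
        rw [if_neg (by exact fun hmem => hnd.1 hmem.1)]
        rw [pvEnt_set]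
        simp only [Int.toNat_natCast] at hq3 hq4 ⊢
        rw [if_pos ⟨trivial, trivial, hq3, hq4⟩, if_pos ⟨by simp, hc⟩]
      · have hEnt : pvEnt (m.set q.1.toNat ((pvRow m q.1.toNat).set q.2.toNat
            (g q (pvEnt m q.1.toNat q.2.toNat)))) x y = pvEnt m x y := by
          rw [pvEnt_set]
          exact if_neg (by
            rintro ⟨h1, h2, -, -⟩
            exact hcell (Prod.ext (by omega) (by omega)))
        rw [hEnt]
        have hmem : (((x : Int), (y : Int)) ∈ q :: t) ↔ (((x : Int), (y : Int)) ∈ t) := by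
          rw [List.mem_cons]
          exact ⟨fun h => h.resolve_left (fun h' => hcell h'.symm), Or.inr⟩
        rw [eq_comm]
        simp only [hmem]
    · rw [if_neg hc]
      rw [ih hnd.2 m (fun q' hq' hc' => h q' (by simp [hq']) hc') hx hy]
      by_cases hcell : q = ((x : Int), (y : Int))
      · subst hcell
        rw [if_neg (fun hh => hc hh.2), if_neg (fun hh => hc hh.2)]
      · have hmem : (((x : Int), (y : Int)) ∈ q :: t) ↔ (((x : Int), (y : Int)) ∈ t) := by
          rw [List.mem_cons]
          exact ⟨fun h => h.resolve_left (fun h' => hcell h'.symm), Or.inr⟩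
        rw [eq_comm]
        simp only [hmem]

theorem pvProd_beq (a b c d : Int) : ((a, b) == (c, d)) = ((a == c) && (b == d)) :=
  Bool.le_antisymm (fun h => h) (fun h => h)

def pvF (aw sent : List String) (i : Nat) : Int := pvIdx aw (sent.getD i "")

def pvCells (aw sent : List String) : List (Int × Int) :=
  (List.range sent.length).flatMap (fun i =>
    ((List.range sent.length).filter (fun a => !(i == a))).map
      (fun a => (pvF aw sent i, pvF aw sent a)))

theorem pvA_norm (sm : List (List Int)) (sent : List String) (index : Int)
    (aw : List String) (it : List Int) :
    sentence_similarity sm sent index aw it =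
      (pvCells aw sent).foldl (pvStepF (fun v =>
        if index < PySem.List.pyGetD it 3 0 - 1 then v + (pvGetWeight index it).getD 0
        else v * 2)) sm := by
  unfold sentence_similarity pvCells
  rw [PySem.List.pyRange_zero_natCast, List.foldl_map, List.foldl_flatMap]
  congr 1
  funext m i
  rw [List.foldl_map, List.foldl_map, List.foldl_filter]
  congr 1
  funext m' a
  by_cases hia : i = a
  · simp [hia]
  · have h1 : ¬((i : Int) = (a : Int)) := by omega
    have h2 : (!(i == a)) = true := by simp [hia]
    rw [if_neg h1, if_pos h2, pvStepF]
    simp only [PySem.List.pyGetD_natCast]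
    by_cases hbr : index < PySem.List.pyGetD it 3 0 - 1
    · rw [if_pos hbr, if_pos hbr]; rfl
    · rw [if_neg hbr, if_neg hbr]; rfl

theorem pvCells_small (aw sent : List String) (h : sent.length < 2) :
    pvCells aw sent = [] := by
  have h' : sent.length = 0 ∨ sent.length = 1 := by omega
  rcases h' with h0 | h1
  · simp [pvCells, h0]
  · simp [pvCells, h1, List.range_succ]

def pvCnt (aw sent : List String) (x : Int) : Nat :=
  (List.range sent.length).countP (fun i => pvF aw sent i == x)

theorem pvSum_ite_const {α : Type} (l : List α) (p : α → Bool) (k : Nat) :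
    (l.map (fun a => if p a then k else 0)).sum = k * l.countP p := by
  induction l with
  | nil => simp
  | cons a t ih =>
    rw [List.map_cons, List.sum_cons, ih, List.countP_cons]
    by_cases h : p a
    · simp only [h, if_true]; ring
    · simp [h]

theorem pvCountP_and_eq (l : List Nat) (p : Nat → Bool) (i : Nat) :
    l.countP (fun a => p a && (i == a)) = if p i then l.count i else 0 := by
  induction l with
  | nil => simp
  | cons a t ih =>
    rw [List.countP_cons, List.count_cons, ih]
    by_cases hia : i = a
    · subst hia
      by_cases hp : p i
      · simp [hp]
      · simp [hp]
    · have : (i == a) = false := by simp [hia]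
      have : (a == i) = false := by simp; omega
      by_cases hp : p i <;> simp_all

theorem pvPerI (n i : Nat) (hi : i < n) (F : Nat → Int) (x y : Int) :
    (List.range n).countP (fun a => ((F i == x) && (F a == y)) && !(i == a))
      + (if (F i == x) && (F i == y) then 1 else 0)
      = if F i == x then (List.range n).countP (fun a => F a == y) else 0 := by
  by_cases hx : (F i == x) = true
  · rw [if_pos hx]
    have hc1 : (List.range n).countP (fun a => ((F i == x) && (F a == y)) && !(i == a))
        = (List.range n).countP (fun a => (F a == y) && !(i == a)) :=
      List.countP_congr (by intro a _; simp [hx])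
    have hsplit := List.countP_eq_countP_filter_add (List.range n)
      (fun a => F a == y) (fun a => i == a)
    rw [List.countP_filter, List.countP_filter] at hsplit
    have hone : (List.range n).countP (fun a => (F a == y) && (i == a))
        = if (F i == y) = true then 1 else 0 := by
      rw [pvCountP_and_eq (List.range n) (fun a => F a == y) i, List.count_range, if_pos hi]
    rw [hc1, hsplit, hone]
    by_cases hy : (F i == y) = true <;> simp [hx, hy] <;> omega
  · rw [if_neg hx]
    have h0 : (List.range n).countP (fun a => ((F i == x) && (F a == y)) && !(i == a)) = 0 := by
      rw [List.countP_eq_zero]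
      intro a _
      simp [hx]
    rw [h0]
    simp [hx]

theorem pvCount_cells (aw sent : List String) (x y : Int) :
    (pvCells aw sent).count (x, y) + (if x = y then pvCnt aw sent x else 0)
      = pvCnt aw sent x * pvCnt aw sent y := by
  unfold pvCells pvCnt
  rw [List.count_flatMap]
  have hinner : ∀ i ∈ List.range sent.length,
      (List.count (x, y) ∘ fun i =>
          ((List.range sent.length).filter (fun a => !(i == a))).map
            (fun a => (pvF aw sent i, pvF aw sent a)))
        i
      = (List.range sent.length).countP
          (fun a => ((pvF aw sent i == x) && (pvF aw sent a == y)) && !(i == a)) := by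
    intro i _
    simp only [Function.comp_apply]
    rw [List.count_eq_countP, List.countP_map, List.countP_filter]
    apply List.countP_congr
    intro a _
    simp only [Function.comp_apply, pvProd_beq]
  rw [List.map_congr_left hinner]
  -- e-sum
  have hesum : ((List.range sent.length).map
      (fun i => if (pvF aw sent i == x) && (pvF aw sent i == y) then 1 else 0)).sum
      = if x = y then (List.range sent.length).countP (fun i => pvF aw sent i == x) else 0 := by
    rw [pvSum_ite_const, Nat.one_mul]
    by_cases hxy : x = y
    · subst hxy
      rw [if_pos rfl]
      exact List.countP_congr (by intro a _; simp)
    · rw [if_neg hxy, List.countP_eq_zero]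
      intro a _
      simp only [Bool.and_eq_true, beq_iff_eq]
      rintro ⟨rfl, rfl⟩
      exact hxy rfl
  -- rhs sum
  have hrsum : ((List.range sent.length).map
      (fun i => if pvF aw sent i == x
        then (List.range sent.length).countP (fun a => pvF aw sent a == y) else 0)).sum
      = (List.range sent.length).countP (fun i => pvF aw sent i == x)
          * (List.range sent.length).countP (fun i => pvF aw sent i == y) := by
    rw [pvSum_ite_const, Nat.mul_comm]
  rw [← hesum, ← hrsum, ← List.sum_map_add]
  apply congrArg
  apply List.map_congr_left
  intro i hi
  exact pvPerI sent.length i (List.mem_range.mp hi) (pvF aw sent) x y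

def pvPosD (aw : List String) : PySem.Dict String Int :=
  (PySem.List.enumerate aw 0).foldl
    (fun d p => if !(d.contains p.2) then d.insert p.2 p.1 else d) PySem.Dict.empty

theorem pvPos_get (aw : List String) (w : String) : ∀ (s : Int) (d : PySem.Dict String Int),
    ((PySem.List.enumerate aw s).foldl
      (fun d p => if !(d.contains p.2) then d.insert p.2 p.1 else d) d).get? w
    = ((d.get? w).or ((PySem.List.index? aw w).map (fun j => s + (j : Int)))) := by
  induction aw with
  | nil =>
    intro s d
    simp [PySem.List.enumerate_nil, PySem.List.index?]
  | cons a t ih =>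
    intro s d
    rw [PySem.List.enumerate_cons, List.foldl_cons]
    by_cases hw : a = w
    · subst hw
      rw [PySem.List.index?_cons_self]
      by_cases hc : d.contains a
      · rw [if_neg (by simp [hc]), ih]
        obtain ⟨v, hv⟩ : ∃ v, d.get? a = some v := by
          rcases h : d.get? a with _ | v
          · rw [PySem.Dict.get?_eq_none_iff_contains] at h
            simp [h] at hc
          · exact ⟨v, rfl⟩
        simp [hv]
      · rw [if_pos (by simp [hc]), ih]
        have hd : d.get? a = none := by
          rw [PySem.Dict.get?_eq_none_iff_contains]
          simpa using hc
        have hd' : (d.insert a s).get? a = some s := PySem.Dict.get?_insert_self d a s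
        simp [hd, hd']
    · rw [PySem.List.index?_cons_of_ne t hw]
      have hget : (if !(d.contains a) then d.insert a s else d).get? w = d.get? w := by
        split
        · exact PySem.Dict.get?_insert_of_ne d s (fun h => hw h.symm)
        · rfl
      rw [ih (s + 1), hget]
      rcases h : PySem.List.index? t w with _ | j
      · simp
      · simp only [Option.map_some]
        have : ((s + 1 + (j : Int))) = s + ((j : Nat) + 1 : Nat) := by push_cast; ring
        simp [this]

theorem pvPos_getD (aw : List String) (w : String) :
    (pvPosD aw).getD w 0 = pvIdx aw w := by
  rw [PySem.Dict.getD_eq_get?_getD, pvPosD, pvPos_get aw w 0 PySem.Dict.empty]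
  have : (PySem.Dict.empty : PySem.Dict String Int).get? w = none := by
    simp [PySem.Dict.get?_eq_none_iff_contains, PySem.Dict.empty, PySem.Dict.contains]
  rw [this, Option.none_or, pvIdx]
  rcases h : PySem.List.index? aw w with _ | j <;> simp

theorem pvSelf_map_range {α : Type} (l : List α) (d : α) :
    (List.range l.length).map (fun i => l.getD i d) = l := by
  apply List.ext_getElem (by simp)
  intro i h1 h2
  simp [List.getD_eq_getElem?_getD, List.getElem?_eq_getElem h2]

theorem pvCount_map (aw sent : List String) (x : Int) :
    (sent.map (pvIdx aw)).count x = pvCnt aw sent x := by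
  rw [List.count_eq_countP, List.countP_map]
  conv_lhs => rw [← pvSelf_map_range sent ""]
  rw [List.countP_map]
  apply List.countP_congr
  intro a _
  simp [pvF, Function.comp]

theorem pvIter_add (w : Int) (k : Nat) (v : Int) : (fun t => t + w)^[k] v = v + w * k := by
  induction k generalizing v with
  | zero => simp
  | succ k ih =>
    rw [Function.iterate_succ_apply, ih]
    push_cast
    ring

theorem pvIter_mul2 (k : Nat) (v : Int) : (fun t => t * 2)^[k] v = v * 2 ^ k := by
  induction k generalizing v with
  | zero => simp
  | succ k ih =>
    rw [Function.iterate_succ_apply, ih]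
    ring

theorem pvWeight (index : Int) (it : List Int) (h : index < PySem.List.pyGetD it 3 0 - 1) :
    (pvGetWeight index it).getD 0 =
      if index < PySem.List.pyGetD it 0 0 ∨ index < PySem.List.pyGetD it 1 0 then 2 else 1 := by
  unfold pvGetWeight
  by_cases h0 : index < PySem.List.pyGetD it 0 0
  · simp [h0]
  · by_cases h1 : index < PySem.List.pyGetD it 1 0
    · simp [h0, h1]
    · have h3 : index < PySem.List.pyGetD it 3 0 := by omega
      by_cases h2 : index < PySem.List.pyGetD it 2 0 <;> simp [h0, h1, h2, h3]

def pvKeys (aw sent : List String) : List Int := (PySem.Dict.counter (sent.map (pvIdx aw))).keys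

def pvPairs (aw sent : List String) (x y : Int) : Int :=
  ((sent.map (pvIdx aw)).count x : Int) * ((sent.map (pvIdx aw)).count y : Int)
    - (if x = y then ((sent.map (pvIdx aw)).count x : Int) else 0)

def pvPsB (aw sent : List String) : List (Int × Int) :=
  (pvKeys aw sent).flatMap (fun x => (pvKeys aw sent).map (fun y => (x, y)))

theorem pvCnt_dict (aw sent : List String) :
    sent.foldl (fun d w => d.insert ((pvPosD aw).getD w 0) (d.getD ((pvPosD aw).getD w 0) 0 + 1))
      PySem.Dict.empty = PySem.Dict.counter (sent.map (pvIdx aw)) := by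
  rw [← PySem.Dict.foldl_insert_getD_add_one_eq_counter, List.foldl_map]
  congr 1
  funext d w
  rw [pvPos_getD]

theorem pvB_norm (sm : List (List Int)) (sent : List String) (index : Int)
    (aw : List String) (it : List Int) (hn : ¬ sent.length < 2) :
    sentence_similarity_alt sm sent index aw it =
      if index < PySem.List.pyGetD it 3 0 - 1 then
        (pvPsB aw sent).foldl (fun m q => if pvPairs aw sent q.1 q.2 ≠ 0 then
          pvMSet m q.1 q.2 (pvMGet m q.1 q.2 +
            (if index < PySem.List.pyGetD it 0 0 ∨ index < PySem.List.pyGetD it 1 0 then 2 else 1)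
              * pvPairs aw sent q.1 q.2) else m) sm
      else
        (pvPsB aw sent).foldl (fun m q => if pvPairs aw sent q.1 q.2 ≠ 0 then
          pvMSet m q.1 q.2 (pvMGet m q.1 q.2 * 2 ^ (pvPairs aw sent q.1 q.2).toNat) else m) sm := by
  unfold sentence_similarity_alt
  rw [if_neg hn]
  dsimp only
  have hcnt := pvCnt_dict aw sent
  have hgetD : ∀ x : Int, (PySem.Dict.counter (sent.map (pvIdx aw))).getD x 0
      = ((sent.map (pvIdx aw)).count x : Int) := fun x => PySem.Dict.getD_counter _ x
  simp only [pvPosD] at hcnt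
  rw [hcnt]
  unfold pvPsB pvKeys pvPairs
  rw [List.foldl_flatMap]
  by_cases hbr : index < PySem.List.pyGetD it 3 0 - 1
  · rw [if_pos hbr, if_pos hbr]
    congr 1
    funext m x
    rw [List.foldl_map]
    congr 1
    funext m' y
    simp only [hgetD]
  · rw [if_neg hbr, if_neg hbr, List.foldl_flatMap]
    congr 1
    funext m x
    rw [List.foldl_map]
    congr 1
    funext m' y
    simp only [hgetD]

theorem pvRow_eq_getD (m : List (List Int)) (j : Nat) : pvRow m j = m.getD j [] := by
  rw [pvRow, List.getD_eq_getElem?_getD]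

theorem pvExt (m1 m2 : List (List Int)) (h1 : m1.length = m2.length)
    (h2 : ∀ j : Nat, (pvRow m1 j).length = (pvRow m2 j).length)
    (h3 : ∀ i j : Nat, pvEnt m1 i j = pvEnt m2 i j) : m1 = m2 := by
  apply List.ext_getElem h1
  intro i ha hb
  have hrow1 : pvRow m1 i = m1[i] := by rw [pvRow, List.getElem?_eq_getElem ha]; rfl
  have hrow2 : pvRow m2 i = m2[i] := by rw [pvRow, List.getElem?_eq_getElem hb]; rfl
  apply List.ext_getElem (by rw [← hrow1, ← hrow2, h2 i])
  intro j hj1 hj2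
  have e := h3 i j
  rw [pvEnt, pvEnt, hrow1, hrow2, List.getElem?_eq_getElem hj1, List.getElem?_eq_getElem hj2] at e
  simpa using e

theorem pvEnt_out (m : List (List Int)) (i j : Nat)
    (h : ¬(i < m.length ∧ j < (pvRow m i).length)) : pvEnt m i j = 0 := by
  rw [pvEnt]
  by_cases hi : i < m.length
  · have hj : ¬ j < (pvRow m i).length := fun hj => h ⟨hi, hj⟩
    rw [List.getElem?_eq_none_iff.mpr (show (pvRow m i).length ≤ j by omega)]
    rfl
  · rw [pvRow, List.getElem?_eq_none_iff.mpr (show m.length ≤ i by omega)]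
    simp

theorem pvDecomp (aw sent : List String) (q : Int × Int) (hq : q ∈ pvCells aw sent) :
    ∃ i a : Nat, i < sent.length ∧ a < sent.length ∧ i ≠ a ∧
      q = (pvF aw sent i, pvF aw sent a) := by
  rw [pvCells, List.mem_flatMap] at hq
  obtain ⟨i, hi, hq2⟩ := hq
  rw [List.mem_map] at hq2
  obtain ⟨a, ha, rfl⟩ := hq2
  rw [List.mem_filter] at ha
  obtain ⟨ha1, ha2⟩ := ha
  exact ⟨i, a, List.mem_range.mp hi, List.mem_range.mp ha1, by simpa using ha2, rfl⟩

theorem pvMain (sm : List (List Int)) (sent : List String) (index : Int)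
    (aw : List String) (it : List Int)
    (hpre : Pre_sentence_similarity sm sent index aw it) :
    sentence_similarity sm sent index aw it = sentence_similarity_alt sm sent index aw it := by
  by_cases hn : sent.length < 2
  · rw [pvA_norm, pvCells_small aw sent hn, List.foldl_nil]
    unfold sentence_similarity_alt
    rw [if_pos hn]
  · obtain ⟨hit, hmem, hbnd⟩ := hpre (by omega)
    -- every generated cell is a pair of word indices of two distinct positions, and in bounds
    have hcellsOK : ∀ q ∈ pvCells aw sent, pvCellOK sm q := by
      intro q hq
      obtain ⟨i, a, hi, ha, hne, rfl⟩ := pvDecomp aw sent q hq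
      have hu : sent.getD i "" ∈ sent := by
        rw [List.getD_eq_getElem _ _ hi]; exact List.getElem_mem _
      have hv : sent.getD a "" ∈ sent := by
        rw [List.getD_eq_getElem _ _ ha]; exact List.getElem_mem _
      have hcond : sent.getD i "" ≠ sent.getD a "" ∨ 2 ≤ sent.count (sent.getD i "") := by
        by_cases huv : sent.getD i "" = sent.getD a ""
        · right
          apply List.duplicate_iff_two_le_count.mp
          rw [List.duplicate_iff_exists_distinct_get]
          rcases Nat.lt_or_ge i a with hlt | hge
          · refine ⟨⟨i, hi⟩, ⟨a, ha⟩, by rw [Fin.mk_lt_mk]; omega, ?_, ?_⟩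
            · rw [List.get_eq_getElem]; exact List.getD_eq_getElem sent "" hi
            · rw [huv]
              rw [List.get_eq_getElem]; exact List.getD_eq_getElem sent "" ha
          · refine ⟨⟨a, ha⟩, ⟨i, hi⟩, by rw [Fin.mk_lt_mk]; omega, ?_, ?_⟩
            · rw [huv]
              rw [List.get_eq_getElem]; exact List.getD_eq_getElem sent "" ha
            · rw [List.get_eq_getElem]; exact List.getD_eq_getElem sent "" hi
        · left; exact huv
      obtain ⟨hb1, hb2⟩ := hbnd _ hu _ hv hcond
      refine ⟨by simp [pvF, pvIdx], by simp [pvF, pvIdx], ?_, ?_⟩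
      · simpa [pvF, pvIdx] using hb1
      · rw [pvRow_eq_getD]
        simpa [pvF, pvIdx] using hb2
    have hpairsNA : ∀ x y : Int,
        pvPairs aw sent x y = ((pvCells aw sent).count (x, y) : Int) := by
      intro x y
      have h := pvCount_cells aw sent x y
      unfold pvPairs
      rw [pvCount_map, pvCount_map]
      by_cases hxy : x = y
      · subst hxy
        rw [if_pos rfl] at h
        rw [if_pos rfl]
        omega
      · rw [if_neg hxy] at h
        rw [if_neg hxy]
        omega
    have hmemK : ∀ q : Int × Int, q ∈ pvCells aw sent → q ∈ pvPsB aw sent := by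
      intro q hq
      obtain ⟨i, a, hi, ha, hne, rfl⟩ := pvDecomp aw sent q hq
      rw [pvPsB, show (pvKeys aw sent).flatMap (fun x => (pvKeys aw sent).map (fun y => (x, y)))
        = (pvKeys aw sent).product (pvKeys aw sent) from rfl, List.pair_mem_product]
      constructor
      · rw [pvKeys, PySem.Dict.keys_counter, PySem.Set.mem_ofList]
        exact List.mem_map.mpr ⟨sent.getD i "", by
          rw [List.getD_eq_getElem _ _ hi]; exact List.getElem_mem _, rfl⟩
      · rw [pvKeys, PySem.Dict.keys_counter, PySem.Set.mem_ofList]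
        exact List.mem_map.mpr ⟨sent.getD a "", by
          rw [List.getD_eq_getElem _ _ ha]; exact List.getElem_mem _, rfl⟩
    have hOKB : ∀ q ∈ pvPsB aw sent, pvPairs aw sent q.1 q.2 ≠ 0 → pvCellOK sm q := by
      intro q _ hp
      have hcnt0 : (pvCells aw sent).count (q.1, q.2) ≠ 0 := by
        intro h0
        apply hp
        rw [hpairsNA q.1 q.2, h0]
        rfl
      have hqmem2 : (q.1, q.2) ∈ pvCells aw sent :=
        List.count_pos_iff.mp (Nat.pos_of_ne_zero hcnt0)
      rw [Prod.mk.eta] at hqmem2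
      exact hcellsOK q hqmem2
    have hKnodup : (pvKeys aw sent).Nodup := PySem.Dict.nodup_keys_counter _
    have hPsNodup : (pvPsB aw sent).Nodup := by
      rw [pvPsB, show (pvKeys aw sent).flatMap (fun x => (pvKeys aw sent).map (fun y => (x, y)))
        = (pvKeys aw sent).product (pvKeys aw sent) from rfl]
      exact hKnodup.product hKnodup
    rw [pvA_norm, pvB_norm sm sent index aw it hn]
    by_cases hbr : index < PySem.List.pyGetD it 3 0 - 1
    · rw [if_pos hbr]
      have hf : (fun v : Int => if index < PySem.List.pyGetD it 3 0 - 1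
            then v + (pvGetWeight index it).getD 0 else v * 2)
          = (fun v : Int => v + (if index < PySem.List.pyGetD it 0 0
              ∨ index < PySem.List.pyGetD it 1 0 then 2 else 1)) :=
        funext fun v => by rw [if_pos hbr, pvWeight index it hbr]
      rw [hf]
      set w : Int := if index < PySem.List.pyGetD it 0 0 ∨ index < PySem.List.pyGetD it 1 0
        then 2 else 1 with hw
      have hshA := pvFoldl_shape (pvStepF (fun v => v + w)) (pvCells aw sent) sm
        (fun m' q hq => ⟨pvMSet_length m' q.1 q.2 _,
          fun j => pvMSet_rowlen m' _ (hcellsOK q hq).1 (hcellsOK q hq).2.1 j⟩)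
      have hshB := pvFoldl_shape
        (fun m' q => if pvPairs aw sent q.1 q.2 ≠ 0 then
          pvMSet m' q.1 q.2 (pvMGet m' q.1 q.2 + w * pvPairs aw sent q.1 q.2) else m')
        (pvPsB aw sent) sm
        (fun m' q hq => by
          dsimp only
          by_cases hp : pvPairs aw sent q.1 q.2 ≠ 0
          · rw [if_pos hp]
            exact ⟨pvMSet_length m' q.1 q.2 _,
              fun j => pvMSet_rowlen m' _ (hOKB q hq hp).1 (hOKB q hq hp).2.1 j⟩
          · rw [if_neg hp]; exact ⟨rfl, fun _ => rfl⟩)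
      apply pvExt
      · rw [hshA.1, hshB.1]
      · intro j; rw [hshA.2 j, hshB.2 j]
      · intro i j
        by_cases hin : i < sm.length ∧ j < (pvRow sm i).length
        · rw [pvEntA (fun v => v + w) (pvCells aw sent) sm hcellsOK i j hin.1 hin.2,
            pvEntB (fun q => pvPairs aw sent q.1 q.2 ≠ 0)
              (fun q v => v + w * pvPairs aw sent q.1 q.2) (pvPsB aw sent) hPsNodup sm
              hOKB i j hin.1 hin.2]
          by_cases hna : (pvCells aw sent).count ((i : Int), (j : Int)) = 0
          · rw [hna, if_neg (by
              rintro ⟨-, hp⟩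
              exact hp (by rw [hpairsNA, hna]; rfl))]
            simp
          · rw [if_pos ⟨hmemK _ (List.count_pos_iff.mp (Nat.pos_of_ne_zero hna)),
              by rw [hpairsNA]; exact_mod_cast hna⟩]
            rw [pvIter_add, hpairsNA]
        · rw [pvEnt_out _ i j (by rw [hshA.1, hshA.2 i]; exact hin),
            pvEnt_out _ i j (by rw [hshB.1, hshB.2 i]; exact hin)]
    · rw [if_neg hbr]
      have hf : (fun v : Int => if index < PySem.List.pyGetD it 3 0 - 1
            then v + (pvGetWeight index it).getD 0 else v * 2)
          = (fun v : Int => v * 2) := funext fun v => by rw [if_neg hbr]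
      rw [hf]
      have hshA := pvFoldl_shape (pvStepF (fun v => v * 2)) (pvCells aw sent) sm
        (fun m' q hq => ⟨pvMSet_length m' q.1 q.2 _,
          fun j => pvMSet_rowlen m' _ (hcellsOK q hq).1 (hcellsOK q hq).2.1 j⟩)
      have hshB := pvFoldl_shape
        (fun m' q => if pvPairs aw sent q.1 q.2 ≠ 0 then
          pvMSet m' q.1 q.2 (pvMGet m' q.1 q.2 * 2 ^ (pvPairs aw sent q.1 q.2).toNat) else m')
        (pvPsB aw sent) sm
        (fun m' q hq => by
          dsimp only
          by_cases hp : pvPairs aw sent q.1 q.2 ≠ 0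
          · rw [if_pos hp]
            exact ⟨pvMSet_length m' q.1 q.2 _,
              fun j => pvMSet_rowlen m' _ (hOKB q hq hp).1 (hOKB q hq hp).2.1 j⟩
          · rw [if_neg hp]; exact ⟨rfl, fun _ => rfl⟩)
      apply pvExt
      · rw [hshA.1, hshB.1]
      · intro j; rw [hshA.2 j, hshB.2 j]
      · intro i j
        by_cases hin : i < sm.length ∧ j < (pvRow sm i).length
        · rw [pvEntA (fun v => v * 2) (pvCells aw sent) sm hcellsOK i j hin.1 hin.2,
            pvEntB (fun q => pvPairs aw sent q.1 q.2 ≠ 0)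
              (fun q v => v * 2 ^ (pvPairs aw sent q.1 q.2).toNat) (pvPsB aw sent) hPsNodup sm
              hOKB i j hin.1 hin.2]
          by_cases hna : (pvCells aw sent).count ((i : Int), (j : Int)) = 0
          · rw [hna, if_neg (by
              rintro ⟨-, hp⟩
              exact hp (by rw [hpairsNA, hna]; rfl))]
            simp
          · rw [if_pos ⟨hmemK _ (List.count_pos_iff.mp (Nat.pos_of_ne_zero hna)),
              by rw [hpairsNA]; exact_mod_cast hna⟩]
            rw [pvIter_mul2, hpairsNA, Int.toNat_natCast]
        · rw [pvEnt_out _ i j (by rw [hshA.1, hshA.2 i]; exact hin),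
            pvEnt_out _ i j (by rw [hshB.1, hshB.2 i]; exact hin)]

-- ===== VERDICT (by name: the statement is the Claim_ definition above) =====
theorem sentence_similarity_spec : Claim_equal_sentence_similarity := by
  intro sm sent index aw it _hdom hpre
  unfold Spec_sentence_similarity
  exact pvMain sm sent index aw it hpre
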